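-- pv_equiv track=rewrite | github.com/nemmiz/aoc2018 | python/06.py | closest_exclusive_point
-- ===== SOURCE A (Python) =====
-- def manhattan(x1, y1, x2, y2):
--     return abs(x1 - x2) + abs(y1 - y2)
--
-- def closest_distance(xcoords, ycoords, x, y):
--     n = len(xcoords)
--     best_distance = manhattan(xcoords[0], ycoords[0], x, y)
--     for i in range(1, n):
--         distance = manhattan(xcoords[i], ycoords[i], x, y)
--         if distance < best_distance:
--             best_distance = distance
--     return best_distance
--
-- def closest_exclusive_point(xcoords, ycoords, x, y):
--     point_id = None
--     distance = closest_distance(xcoords, ycoords, x, y)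
--     for i, point in enumerate(zip(xcoords, ycoords)):
--         if manhattan(x, y, point[0], point[1]) == distance:
--             if point_id is None:
--                 point_id = i
--             else:
--                 return None
--     return point_id
-- ===== SOURCE B (Python) =====
-- def closest_exclusive_point(xcoords, ycoords, x, y):
--     best = None
--     idx = None
--     count = 0
--     for i, (px, py) in enumerate(zip(xcoords, ycoords)):
--         d = abs(px - x) + abs(py - y)
--         if best is None or d < best:
--             best, idx, count = d, i, 1
--         elif d == best:
--             count += 1
--     return idx if count == 1 else None
-- ===== Notes on version B (the rewrite author's own statement) =====
-- stated objective: faster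
-- what changed: Replaces A's two passes (a separate minimum-distance scan, then a match-counting loop with early return) by one single pass that maintains the running best distance, the first index achieving it, and a count of points achieving it, so each Manhattan distance is computed once instead of twice.
import Mathlib
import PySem

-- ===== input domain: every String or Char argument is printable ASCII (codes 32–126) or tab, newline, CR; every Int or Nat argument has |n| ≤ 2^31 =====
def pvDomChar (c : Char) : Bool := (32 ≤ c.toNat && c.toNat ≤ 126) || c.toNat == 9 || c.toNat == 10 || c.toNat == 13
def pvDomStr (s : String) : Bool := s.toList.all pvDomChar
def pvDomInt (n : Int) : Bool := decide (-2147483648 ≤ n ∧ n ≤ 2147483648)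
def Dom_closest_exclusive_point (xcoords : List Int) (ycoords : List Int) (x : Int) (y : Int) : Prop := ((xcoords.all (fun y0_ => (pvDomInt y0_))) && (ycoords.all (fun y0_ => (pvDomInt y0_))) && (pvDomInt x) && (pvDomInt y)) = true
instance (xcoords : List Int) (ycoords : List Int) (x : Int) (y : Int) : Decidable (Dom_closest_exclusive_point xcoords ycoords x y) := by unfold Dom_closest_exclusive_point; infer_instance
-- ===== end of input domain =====

-- B replaces A's two passes (minimum scan, then counting loop) by one single pass
-- keeping best distance, first index at best, and count; same return value on Pre_.

-- ===== PORT A =====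
def pvManhattan (x1 y1 x2 y2 : Int) : Int := |x1 - x2| + |y1 - y2|

-- closest_distance: the pyGetD default 0 is only reached outside Pre_ (where Python raises IndexError)
def pvClosestDistance (xcoords ycoords : List Int) (x y : Int) : Int :=
  let n : Int := xcoords.length
  (PySem.List.pyRange 1 n 1).foldl
    (fun best i =>
      let d := pvManhattan (PySem.List.pyGetD xcoords i 0) (PySem.List.pyGetD ycoords i 0) x y
      if d < best then d else best)
    (pvManhattan (PySem.List.pyGetD xcoords 0 0) (PySem.List.pyGetD ycoords 0 0) x y)

-- the for-loop of A, with its early `return None`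
def pvLoopA (x y dist : Int) : List (Int × (Int × Int)) → Option Int → Option Int
  | [], pid => pid
  | (i, p) :: rest, pid =>
    if pvManhattan x y p.1 p.2 = dist then
      match pid with
      | none => pvLoopA x y dist rest (some i)
      | some _ => none
    else pvLoopA x y dist rest pid

def closest_exclusive_point (xcoords : List Int) (ycoords : List Int) (x : Int) (y : Int) : Option Int :=
  let distance := pvClosestDistance xcoords ycoords x y
  pvLoopA x y distance (PySem.List.enumerate (xcoords.zip ycoords) 0) none

-- ===== PORT B =====
def pvStepB (x y : Int) (st : Option Int × Option Int × Int) (ip : Int × (Int × Int)) :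
    Option Int × Option Int × Int :=
  let d := |ip.2.1 - x| + |ip.2.2 - y|
  match st.1 with
  | none => (some d, some ip.1, 1)
  | some b =>
    if d < b then (some d, some ip.1, 1)
    else if d = b then (st.1, st.2.1, st.2.2 + 1)
    else st

def closest_exclusive_point_alt (xcoords : List Int) (ycoords : List Int) (x : Int) (y : Int) : Option Int :=
  let st := (PySem.List.enumerate (xcoords.zip ycoords) 0).foldl (pvStepB x y) (none, none, 0)
  if st.2.2 = 1 then st.2.1 else none

-- ===== PRECONDITION & SPEC =====
-- Pre_ excludes exactly the inputs where A raises IndexError: empty xcoords, or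
-- ycoords shorter than xcoords (closest_distance indexes ycoords[i] for all i < len(xcoords)).
def Pre_closest_exclusive_point (xcoords : List Int) (ycoords : List Int) (x : Int) (y : Int) : Prop :=
  xcoords ≠ [] ∧ xcoords.length ≤ ycoords.length
instance (xcoords : List Int) (ycoords : List Int) (x : Int) (y : Int) : Decidable (Pre_closest_exclusive_point xcoords ycoords x y) := by unfold Pre_closest_exclusive_point; infer_instance

def pvWitness_closest_exclusive_point : List Int × List Int × Int × Int := ([1, 4], [2, 2], 0, 0)

def Spec_closest_exclusive_point (xcoords : List Int) (ycoords : List Int) (x : Int) (y : Int) (out : Option Int) : Prop := out = closest_exclusive_point_alt xcoords ycoords x y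
instance (xcoords : List Int) (ycoords : List Int) (x : Int) (y : Int) (out : Option Int) : Decidable (Spec_closest_exclusive_point xcoords ycoords x y out) := by unfold Spec_closest_exclusive_point; infer_instance

-- ===== CLAIM (what is proved, stated in full; the proofs are below) =====
def Claim_equal_closest_exclusive_point : Prop := ∀ (xcoords : List Int) (ycoords : List Int) (x : Int) (y : Int), Dom_closest_exclusive_point xcoords ycoords x y → Pre_closest_exclusive_point xcoords ycoords x y → Spec_closest_exclusive_point xcoords ycoords x y (closest_exclusive_point xcoords ycoords x y)

-- ===== LEMMAS AND PROOFS =====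

-- distance of a zipped point from (x, y)
def pvF (x y : Int) (p : Int × Int) : Int := |p.1 - x| + |p.2 - y|

-- indices (from s) of points at distance m
def pvMl (x y m : Int) : List (Int × Int) → Int → List Int
  | [], _ => []
  | p :: r, s => if pvF x y p = m then s :: pvMl x y m r (s + 1) else pvMl x y m r (s + 1)

theorem pvLoopA_char (x y m : Int) : ∀ (l : List (Int × Int)) (s : Int) (pid : Option Int),
    pvLoopA x y m (PySem.List.enumerate l s) pid =
      (match pid, pvMl x y m l s with
       | none, [] => none
       | none, [i] => some i
       | none, _ :: _ :: _ => none
       | some j, [] => some j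
       | some _, _ :: _ => none) := by
  intro l
  induction l with
  | nil => intro s pid; cases pid <;> simp [pvLoopA, pvMl, PySem.List.enumerate_nil]
  | cons p r ih =>
    intro s pid
    rw [PySem.List.enumerate_cons]
    have hm : pvManhattan x y p.1 p.2 = pvF x y p := by
      simp [pvManhattan, pvF, abs_sub_comm]
    by_cases h : pvF x y p = m
    · cases pid with
      | none =>
        simp only [pvLoopA, hm, h, if_pos rfl, pvMl]
        rw [ih]
        rcases hml : pvMl x y m r (s + 1) with _ | ⟨a, t⟩ <;> simp
      | some j =>
        simp [pvLoopA, hm, h, pvMl]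
    · cases pid with
      | none =>
        simp only [pvLoopA, hm, if_neg h, pvMl]
        rw [ih]
      | some j =>
        simp only [pvLoopA, hm, if_neg h, pvMl]
        rw [ih]

theorem pvMl_length (x y m : Int) : ∀ (l : List (Int × Int)) (s : Int),
    (pvMl x y m l s).length = l.countP (fun p => pvF x y p = m) := by
  intro l
  induction l with
  | nil => intro s; simp [pvMl]
  | cons p r ih =>
    intro s
    by_cases h : pvF x y p = m <;> simp [pvMl, h, List.countP_cons, ih]

-- running minimum over the rest of the list
def pvMin (x y : Int) (b : Int) (l : List (Int × Int)) : Int :=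
  l.foldl (fun a p => min a (pvF x y p)) b

theorem pvMin_le (x y b : Int) : ∀ (l : List (Int × Int)), pvMin x y b l ≤ b := by
  intro l
  induction l generalizing b with
  | nil => simp [pvMin]
  | cons p r ih =>
    simpa [pvMin, List.foldl_cons] using le_trans (ih (min b (pvF x y p))) (min_le_left _ _)

-- the one B-loop invariant: running the fold from a seeded state
theorem pvFoldB_run (x y : Int) : ∀ (l : List (Int × Int)) (s b : Int) (j : Option Int) (c : Int),
    (PySem.List.enumerate l s).foldl (pvStepB x y) (some b, j, c) =
      (if pvMin x y b l < b then
        (some (pvMin x y b l),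
         some ((pvMl x y (pvMin x y b l) l s).headD 0),
         ((pvMl x y (pvMin x y b l) l s).length : Int))
       else (some b, j, c + (l.countP (fun p => pvF x y p = b) : Int))) := by
  intro l
  induction l with
  | nil =>
    intro s b j c
    simp [pvMin, PySem.List.enumerate_nil]
  | cons p r ih =>
    intro s b j c
    rw [PySem.List.enumerate_cons]
    have hstep : pvStepB x y (some b, j, c) (s, p) =
        (if pvF x y p < b then (some (pvF x y p), some s, 1)
         else if pvF x y p = b then (some b, j, c + 1) else (some b, j, c)) := rfl
    have hmin : pvMin x y b (p :: r) = pvMin x y (min b (pvF x y p)) r := by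
      simp [pvMin, List.foldl_cons]
    rcases lt_trichotomy (pvF x y p) b with hlt | heq | hgt
    · -- strict improvement: state resets
      have hminp : pvMin x y b (p :: r) = pvMin x y (pvF x y p) r := by
        rw [hmin, min_eq_right hlt.le]
      rw [List.foldl_cons, hstep, if_pos hlt, ih]
      have hle : pvMin x y (pvF x y p) r ≤ pvF x y p := pvMin_le x y _ r
      by_cases h2 : pvMin x y (pvF x y p) r < pvF x y p
      · -- further improvement inside r: p itself is not at the minimum
        have hne : ¬ pvF x y p = pvMin x y (pvF x y p) r := by omega
        have : pvMin x y b (p :: r) < b := by rw [hminp]; omega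
        rw [if_pos h2, if_pos this, hminp]
        simp [pvMl, hne]
      · -- p is at the minimum
        have h3 : pvMin x y (pvF x y p) r = pvF x y p := le_antisymm hle (by omega)
        have : pvMin x y b (p :: r) < b := by rw [hminp]; omega
        rw [if_neg h2, if_pos this, hminp, h3]
        simp [pvMl, pvMl_length]
        omega
    · -- equal: count goes up
      subst heq
      rw [List.foldl_cons, hstep, if_neg (lt_irrefl _), if_pos rfl, ih]
      have hminp : pvMin x y (pvF x y p) (p :: r) = pvMin x y (pvF x y p) r := by
        rw [hmin, min_self]
      by_cases h2 : pvMin x y (pvF x y p) r < pvF x y p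
      · have hne : ¬ pvF x y p = pvMin x y (pvF x y p) r := by omega
        rw [if_pos h2, if_pos (by omega : pvMin x y (pvF x y p) (p :: r) < pvF x y p), hminp]
        simp [pvMl, hne]
      · rw [if_neg h2, if_neg (by omega : ¬ pvMin x y (pvF x y p) (p :: r) < pvF x y p)]
        simp [List.countP_cons]
        omega
    · -- worse: state unchanged
      rw [List.foldl_cons, hstep, if_neg (by omega), if_neg (by omega), ih]
      have hminp : pvMin x y b (p :: r) = pvMin x y b r := by
        rw [hmin, min_eq_left hgt.le]
      have hne : ¬ pvF x y p = b := by omega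
      by_cases h2 : pvMin x y b r < b
      · have hne2 : ¬ pvF x y p = pvMin x y b r := by
          have := pvMin_le x y b r; omega
        rw [if_pos h2, if_pos (by omega : pvMin x y b (p :: r) < b), hminp]
        simp [pvMl, hne2]
      · rw [if_neg h2, if_neg (by omega : ¬ pvMin x y b (p :: r) < b)]
        simp [List.countP_cons, hne]

-- B's result on a nonempty zip, via the invariant
theorem pvMatchShape (L : List Int) :
    (if (L.length : Int) = 1 then some (L.headD 0) else none) =
      (match L with | [] => none | [i] => some i | _ :: _ :: _ => none) := by
  rcases L with _ | ⟨a, _ | ⟨b, t⟩⟩ <;> simp <;> omega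

theorem pvAltChar (x y : Int) (q : Int × Int) (r : List (Int × Int)) :
    (if ((PySem.List.enumerate (q :: r) 0).foldl (pvStepB x y) (none, none, 0)).2.2 = 1
     then ((PySem.List.enumerate (q :: r) 0).foldl (pvStepB x y) (none, none, 0)).2.1
     else none) =
      (match pvMl x y (pvMin x y (pvF x y q) r) (q :: r) 0 with
       | [] => none
       | [i] => some i
       | _ :: _ :: _ => none) := by
  rw [PySem.List.enumerate_cons, List.foldl_cons]
  have h0 : pvStepB x y (none, none, 0) (0, q) = (some (pvF x y q), some 0, 1) := rfl
  rw [h0, pvFoldB_run]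
  have hle : pvMin x y (pvF x y q) r ≤ pvF x y q := pvMin_le x y _ r
  by_cases h2 : pvMin x y (pvF x y q) r < pvF x y q
  · have hne : ¬ pvF x y q = pvMin x y (pvF x y q) r := by omega
    rw [if_pos h2]
    simp only [pvMl, if_neg hne]
    simpa using pvMatchShape (pvMl x y (pvMin x y (pvF x y q) r) r 1)
  · have h3 : pvF x y q = pvMin x y (pvF x y q) r := by omega
    rw [if_neg h2]
    have hpred : (fun p => decide (pvF x y p = pvF x y q))
        = (fun p => decide (pvF x y p = pvMin x y (pvF x y q) r)) := by
      funext p; conv_lhs => rw [h3]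
    simp only [pvMl, if_pos h3, hpred, zero_add]
    have hcnt := pvMl_length x y (pvMin x y (pvF x y q) r) r 1
    rcases hml : pvMl x y (pvMin x y (pvF x y q) r) r 1 with _ | ⟨a, t⟩
    · rw [hml] at hcnt
      simp only [List.length_nil] at hcnt
      rw [← hcnt]
      simp
    · rw [hml] at hcnt
      simp only [List.length_cons] at hcnt
      rw [← hcnt]
      have hnum : (1 : Int) + ((t.length + 1 : Nat) : Int) ≠ 1 := by push_cast; omega
      rw [if_neg hnum]

-- A's closest_distance, under Pre_, is the running minimum over the zip
theorem pvCD_char (xs ys : List Int) (x y : Int) (q : Int × Int) (r : List (Int × Int))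
    (hzip : xs.zip ys = q :: r) (hlen : xs.length ≤ ys.length) (hne : xs ≠ []) :
    pvClosestDistance xs ys x y = pvMin x y (pvF x y q) r := by
  have hlz : (xs.zip ys).length = xs.length := by
    simp [List.length_zip]; omega
  have hx0 : 0 < xs.length := List.length_pos_iff.mpr hne
  have key : ∀ (k : Nat), k ≤ xs.length → ∀ (init : Int),
      (PySem.List.pyRange 1 (k : Int) 1).foldl
        (fun best i =>
          let d := pvManhattan (PySem.List.pyGetD xs i 0) (PySem.List.pyGetD ys i 0) x y
          if d < best then d else best) init
      = (((xs.zip ys).take k).drop 1).foldl (fun a p => min a (pvF x y p)) init := by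
    intro k
    induction k with
    | zero => intro _ init; simp [PySem.List.pyRange_one_eq_nil]
    | succ k ihk =>
      intro hk init
      by_cases hk1 : k = 0
      · subst hk1
        simp [PySem.List.pyRange_one_eq_nil (by omega : (1:Int) ≤ 1)]
      · have h1k : (1 : Int) ≤ (k : Int) := by omega
        have hsplit : PySem.List.pyRange 1 ((k : Nat) + 1 : Int) 1
            = PySem.List.pyRange 1 (k : Int) 1 ++ [(k : Int)] := by
          have := PySem.List.pyRange_one_succ_right (a := 1) (b := (k : Int)) h1k
          simpa using this
        have hcast : ((k + 1 : Nat) : Int) = ((k : Int) + 1) := by push_cast; ring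
        rw [hcast, hsplit, List.foldl_append, ihk (by omega)]
        have hkx : k < xs.length := by omega
        have hky : k < ys.length := by omega
        have hkz : k < (xs.zip ys).length := by omega
        have htake : ((xs.zip ys).take (k + 1)).drop 1
            = ((xs.zip ys).take k).drop 1 ++ [(xs.zip ys)[k]] := by
          rw [List.take_add_one, List.getElem?_eq_getElem hkz]
          have h1t : 1 ≤ ((xs.zip ys).take k).length := by
            simp [hkz.le]; omega
          simp [List.drop_append_of_le_length h1t]
        rw [htake, List.foldl_append]
        simp only [List.foldl_cons, List.foldl_nil]
        have hgx : PySem.List.pyGetD xs (k : Int) 0 = xs[k] := by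
          simp [PySem.List.pyGetD_natCast, List.getD_eq_getElem?_getD, hkx]
        have hgy : PySem.List.pyGetD ys (k : Int) 0 = ys[k] := by
          simp [PySem.List.pyGetD_natCast, List.getD_eq_getElem?_getD, hky]
        have hzk : (xs.zip ys)[k] = (xs[k], ys[k]) := by
          simp [List.getElem_zip]
        rw [hgx, hgy, hzk]
        simp only [pvManhattan, pvF]
        rw [min_def]
        split_ifs <;> omega
  have hq : (xs.zip ys)[0]'(by omega) = q := by simp [hzip]
  have hg0x : PySem.List.pyGetD xs (0 : Int) 0 = xs[0] := by
    simp [PySem.List.pyGetD_zero, List.getD_eq_getElem?_getD, hx0]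
  have hg0y : PySem.List.pyGetD ys (0 : Int) 0 = ys[0]'(by omega) := by
    simp [PySem.List.pyGetD_zero, List.getD_eq_getElem?_getD, (by omega : 0 < ys.length)]
  have hinit : pvManhattan (PySem.List.pyGetD xs 0 0) (PySem.List.pyGetD ys 0 0) x y = pvF x y q := by
    have : (xs[0], ys[0]'(by omega)) = q := by rw [← hq]; simp [List.getElem_zip]
    rw [hg0x, hg0y]
    simp only [pvManhattan, pvF, ← this]
  have hdrop : (((xs.zip ys).take xs.length).drop 1) = r := by
    rw [List.take_of_length_le (by omega), hzip]; simp
  show (PySem.List.pyRange 1 (xs.length : Int) 1).foldl _ _ = _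
  rw [key xs.length le_rfl, hinit, hdrop, pvMin]

-- ===== VERDICT (by name: the statement is the Claim_ definition above) =====
theorem closest_exclusive_point_spec : Claim_equal_closest_exclusive_point := by
  intro xs ys x y _ hpre
  obtain ⟨hne, hlen⟩ := hpre
  unfold Spec_closest_exclusive_point closest_exclusive_point closest_exclusive_point_alt
  have hz : xs.zip ys ≠ [] := by
    have : (xs.zip ys).length = xs.length := by simp [List.length_zip]; omega
    intro h; rw [h] at this; simp at this
    exact hne (List.length_eq_zero_iff.mp this.symm)
  rcases hzip : xs.zip ys with _ | ⟨q, r⟩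
  · exact absurd hzip hz
  rw [pvCD_char xs ys x y q r hzip hlen hne, pvLoopA_char]
  rw [pvAltChar x y q r]
  generalize pvMl x y (pvMin x y (pvF x y q) r) (q :: r) 0 = L
  rcases L with _ | ⟨a, _ | ⟨b, t⟩⟩ <;> rfl
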